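-- pv_equiv track=rewrite | github.com/ojhaanshu87/LeetCode | 1249_min_remove_valid_parenthesis.py | delete_invalid_closing
-- ===== SOURCE A (Python) =====
-- def delete_invalid_closing(string, open_symbol, close_symbol):
--     res, balance = [], 0
--     for char in string:
--         if char == open_symbol:
--             balance += 1
--         if char == close_symbol:
--             if balance == 0:
--                 continue
--             balance -= 1
--         res.append(char)
--     return "".join(res)
-- ===== SOURCE B (Python) =====
-- def delete_invalid_closing(string, open_symbol, close_symbol):
--     stack = []          # indices of currently unmatched open symbols
--     remove = set()      # indices of close symbols with no matching open
--     for i, char in enumerate(string):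
--         if char == open_symbol:
--             stack.append(i)
--         if char == close_symbol:
--             if stack:
--                 stack.pop()
--             else:
--                 remove.add(i)
--     return "".join(char for i, char in enumerate(string) if i not in remove)
-- ===== Notes on version B (the rewrite author's own statement) =====
-- stated objective: alternative
-- what changed: A's integer balance counter with an append-as-you-go build is replaced by the canonical stack data structure: a stack of open-symbol indices pushed/popped during the scan, a set of unmatched-close indices, and a separate filtering pass that rebuilds the string.
import Mathlib
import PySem

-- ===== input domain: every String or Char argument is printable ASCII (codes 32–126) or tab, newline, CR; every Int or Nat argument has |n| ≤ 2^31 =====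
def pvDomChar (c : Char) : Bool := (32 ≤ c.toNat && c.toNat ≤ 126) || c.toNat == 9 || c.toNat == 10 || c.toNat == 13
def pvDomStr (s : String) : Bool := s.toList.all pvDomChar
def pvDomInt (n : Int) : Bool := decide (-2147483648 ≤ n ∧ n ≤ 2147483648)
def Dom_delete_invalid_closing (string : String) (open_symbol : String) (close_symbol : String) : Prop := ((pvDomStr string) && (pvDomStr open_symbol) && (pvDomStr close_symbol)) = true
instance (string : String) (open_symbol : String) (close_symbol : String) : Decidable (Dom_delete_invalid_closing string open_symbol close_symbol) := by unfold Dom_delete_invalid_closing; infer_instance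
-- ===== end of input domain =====

-- B replaces A's integer balance counter and append-as-you-go build by the canonical
-- stack of open-symbol indices plus a removal-index set and a separate filtering pass
-- (objective: alternative).

-- ===== PORT A =====
-- loop body of A: state = (res, balance); 'char == open_symbol' compares the 1-char string
def pvStepA (open_symbol close_symbol : String) (st : List Char × Int) (c : Char) : List Char × Int :=
  let balance := if String.mk [c] = open_symbol then st.2 + 1 else st.2
  if String.mk [c] = close_symbol then
    if balance = 0 then (st.1, balance)            -- continue
    else (st.1 ++ [c], balance - 1)
  else (st.1 ++ [c], balance)

def delete_invalid_closing (string : String) (open_symbol : String) (close_symbol : String) : String :=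
  String.mk (string.toList.foldl (pvStepA open_symbol close_symbol) ([], 0)).1

-- ===== PORT B =====
-- loop body of B: state = (stack of open indices, remove set);
-- 'stack.pop()' on a nonempty stack removes the last element = dropLast (exact here)
def pvStepB (open_symbol close_symbol : String) (st : List Int × PySem.Set Int) (ic : Int × Char) : List Int × PySem.Set Int :=
  let stack := if String.mk [ic.2] = open_symbol then st.1 ++ [ic.1] else st.1
  if String.mk [ic.2] = close_symbol then
    if stack ≠ [] then (stack.dropLast, st.2)
    else (stack, PySem.Set.add st.2 ic.1)
  else (stack, st.2)

def delete_invalid_closing_alt (string : String) (open_symbol : String) (close_symbol : String) : String :=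
  let remove := ((PySem.List.enumerate string.toList 0).foldl (pvStepB open_symbol close_symbol) ([], PySem.Set.empty)).2
  String.mk (((PySem.List.enumerate string.toList 0).filter
      (fun ic => !(PySem.Set.contains remove ic.1))).map Prod.snd)

-- ===== PRECONDITION & SPEC =====
def Spec_delete_invalid_closing (string : String) (open_symbol : String) (close_symbol : String) (out : String) : Prop := out = delete_invalid_closing_alt string open_symbol close_symbol
instance (string : String) (open_symbol : String) (close_symbol : String) (out : String) : Decidable (Spec_delete_invalid_closing string open_symbol close_symbol out) := by unfold Spec_delete_invalid_closing; infer_instance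

-- ===== CLAIM (what is proved, stated in full; the proofs are below) =====
def Claim_equal_delete_invalid_closing : Prop := ∀ (string : String) (open_symbol : String) (close_symbol : String), Dom_delete_invalid_closing string open_symbol close_symbol → Spec_delete_invalid_closing string open_symbol close_symbol (delete_invalid_closing string open_symbol close_symbol)

-- ===== LEMMAS AND PROOFS =====

-- one-step unfoldings of the two loop bodies (definitional)
lemma pvStepA_eq (o cl : String) (res : List Char) (b : Int) (c : Char) :
    pvStepA o cl (res, b) c =
      if String.mk [c] = cl then
        (if (if String.mk [c] = o then b + 1 else b) = 0 then (res, if String.mk [c] = o then b + 1 else b)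
         else (res ++ [c], (if String.mk [c] = o then b + 1 else b) - 1))
      else (res ++ [c], if String.mk [c] = o then b + 1 else b) := rfl

lemma pvStepB_eq (o cl : String) (s : List Int) (d : PySem.Set Int) (i : Int) (c : Char) :
    pvStepB o cl (s, d) (i, c) =
      if String.mk [c] = cl then
        (if (if String.mk [c] = o then s ++ [i] else s) ≠ [] then ((if String.mk [c] = o then s ++ [i] else s).dropLast, d)
         else ((if String.mk [c] = o then s ++ [i] else s), PySem.Set.add d i))
      else ((if String.mk [c] = o then s ++ [i] else s), d) := rfl

-- A's accumulator splits off: the fold only appends to res.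
lemma pv_foldA_acc (o cl : String) : ∀ (l : List Char) (res : List Char) (b : Int),
    l.foldl (pvStepA o cl) (res, b)
      = (res ++ (l.foldl (pvStepA o cl) ([], b)).1, (l.foldl (pvStepA o cl) ([], b)).2) := by
  intro l
  induction l with
  | nil => intro res b; simp
  | cons c t ih =>
    intro res b
    rw [List.foldl_cons, List.foldl_cons, pvStepA_eq, pvStepA_eq]
    by_cases hc : String.mk [c] = cl
    · by_cases hz : (if String.mk [c] = o then b + 1 else b) = 0
      · rw [if_pos hc, if_pos hz, if_pos hc, if_pos hz]
        exact ih res _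
      · rw [if_pos hc, if_neg hz, if_pos hc, if_neg hz]
        rw [ih (res ++ [c]), ih ([] ++ [c])]
        simp
    · rw [if_neg hc, if_neg hc]
      rw [ih (res ++ [c]), ih ([] ++ [c])]
      simp

-- B's remove set only grows.
lemma pv_foldB_subset (o cl : String) : ∀ (es : List (Int × Char)) (s : List Int) (d : PySem.Set Int)
    (j : Int), j ∈ d → j ∈ (es.foldl (pvStepB o cl) (s, d)).2 := by
  intro es
  induction es with
  | nil => intro s d j hj; simpa using hj
  | cons e t ih =>
    intro s d j hj
    obtain ⟨ei, ec⟩ := e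
    rw [List.foldl_cons, pvStepB_eq]
    by_cases hc : String.mk [ec] = cl
    · by_cases hs : (if String.mk [ec] = o then s ++ [ei] else s) ≠ []
      · rw [if_pos hc, if_pos hs]
        exact ih _ _ _ hj
      · rw [if_pos hc, if_neg hs]
        exact ih _ _ _ ((PySem.Set.mem_add d ei j).2 (Or.inl hj))
    · rw [if_neg hc]
      exact ih _ _ _ hj

-- indices B adds while scanning enumerate l i are ≥ i.
lemma pv_foldB_bound (o cl : String) : ∀ (l : List Char) (i : Int) (s : List Int) (d : PySem.Set Int)
    (j : Int), j ∈ ((PySem.List.enumerate l i).foldl (pvStepB o cl) (s, d)).2 → j ∈ d ∨ i ≤ j := by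
  intro l
  induction l with
  | nil => intro i s d j hj; simp [PySem.List.enumerate_nil] at hj; exact Or.inl hj
  | cons c t ih =>
    intro i s d j hj
    rw [PySem.List.enumerate_cons, List.foldl_cons, pvStepB_eq] at hj
    by_cases hc : String.mk [c] = cl
    · by_cases hs : (if String.mk [c] = o then s ++ [i] else s) ≠ []
      · rw [if_pos hc, if_pos hs] at hj
        rcases ih _ _ _ _ hj with h | h
        · exact Or.inl h
        · exact Or.inr (by omega)
      · rw [if_pos hc, if_neg hs] at hj
        rcases ih _ _ _ _ hj with h | h
        · rcases (PySem.Set.mem_add d i j).1 h with h | h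
          · exact Or.inl h
          · exact Or.inr (by omega)
        · exact Or.inr (by omega)
    · rw [if_neg hc] at hj
      rcases ih _ _ _ _ hj with h | h
      · exact Or.inl h
      · exact Or.inr (by omega)

-- main invariant: B's stack length tracks A's balance; filtering enumerate l i by the
-- final remove set reproduces A's appended output.
lemma pv_key (o cl : String) : ∀ (l : List Char) (i : Int) (s : List Int) (d : PySem.Set Int),
    (∀ j ∈ d, j < i) →
    ((PySem.List.enumerate l i).filter
        (fun ic => !(PySem.Set.contains (((PySem.List.enumerate l i).foldl (pvStepB o cl) (s, d)).2) ic.1))).map Prod.snd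
      = (l.foldl (pvStepA o cl) ([], (s.length : Int))).1 := by
  intro l
  induction l with
  | nil => intro i s d _; simp [PySem.List.enumerate_nil]
  | cons c t ih =>
    intro i s d hd
    rw [PySem.List.enumerate_cons]
    simp only [List.foldl_cons, List.filter_cons, pvStepB_eq, pvStepA_eq]
    by_cases ho : String.mk [c] = o
    · -- open symbol: stack grows, balance grows
      have hz : ¬ ((if String.mk [c] = o then (s.length : Int) + 1 else (s.length : Int)) = 0) := by
        rw [if_pos ho]; omega
      have hs : (if String.mk [c] = o then s ++ [i] else s) ≠ [] := by
        rw [if_pos ho]; simp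
      by_cases hc : String.mk [c] = cl
      · -- equals both open and close: pop right back, char kept
        rw [if_pos hc, if_pos hc, if_pos hs, if_neg hz, if_pos ho, if_pos ho]
        have hdrop : (s ++ [i]).dropLast = s := by simp
        rw [hdrop]
        have hnot : i ∉ ((PySem.List.enumerate t (i + 1)).foldl (pvStepB o cl) (s, d)).2 := by
          intro hmem
          rcases pv_foldB_bound o cl t (i + 1) _ _ i hmem with h | h
          · have := hd i h; omega
          · omega
        rw [if_pos (by simp [PySem.Set.contains]; exact hnot)]
        rw [List.map_cons, ih (i + 1) s d (fun j hj => by have := hd j hj; omega)]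
        have hb : (s.length : Int) + 1 - 1 = (s.length : Int) := by omega
        rw [hb, pv_foldA_acc o cl t ([] ++ [c])]
        simp
      · -- open only: char kept
        rw [if_neg hc, if_neg hc, if_pos ho, if_pos ho]
        have hnot : i ∉ ((PySem.List.enumerate t (i + 1)).foldl (pvStepB o cl) (s ++ [i], d)).2 := by
          intro hmem
          rcases pv_foldB_bound o cl t (i + 1) _ _ i hmem with h | h
          · have := hd i h; omega
          · omega
        rw [if_pos (by simp [PySem.Set.contains]; exact hnot)]
        rw [List.map_cons, ih (i + 1) (s ++ [i]) d (fun j hj => by have := hd j hj; omega)]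
        have hb : ((s ++ [i]).length : Int) = (s.length : Int) + 1 := by simp
        rw [hb, pv_foldA_acc o cl t ([] ++ [c])]
        simp
    · -- not the open symbol
      by_cases hc : String.mk [c] = cl
      · by_cases hse : s = []
        · -- unmatched close: B records i, A skips c
          subst hse
          have hz : (if String.mk [c] = o then (([] : List Int).length : Int) + 1 else (([] : List Int).length : Int)) = 0 := by
            rw [if_neg ho]; simp
          have hs : ¬ ((if String.mk [c] = o then ([] : List Int) ++ [i] else []) ≠ []) := by
            rw [if_neg ho]; simp
          rw [if_pos hc, if_pos hc, if_neg hs, if_pos hz]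
          have hmem : i ∈ ((PySem.List.enumerate t (i + 1)).foldl (pvStepB o cl)
              (if String.mk [c] = o then ([] : List Int) ++ [i] else [], PySem.Set.add d i)).2 :=
            pv_foldB_subset o cl _ _ _ _ ((PySem.Set.mem_add d i i).2 (Or.inr rfl))
          rw [if_neg (by simp [PySem.Set.contains]; exact hmem)]
          simp only [if_neg ho]
          have := ih (i + 1) ([] : List Int) (PySem.Set.add d i) (by
            intro j hj
            rcases (PySem.Set.mem_add d i j).1 hj with h | h
            · have := hd j h; omega
            · omega)
          simpa using this
        · -- matched close: B pops, A decrements; char kept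
          have hz : ¬ ((if String.mk [c] = o then (s.length : Int) + 1 else (s.length : Int)) = 0) := by
            rw [if_neg ho]
            have : 0 < s.length := List.length_pos_iff.2 hse
            omega
          have hs : (if String.mk [c] = o then s ++ [i] else s) ≠ [] := by
            rw [if_neg ho]; exact hse
          rw [if_pos hc, if_pos hc, if_pos hs, if_neg hz, if_neg ho, if_neg ho]
          have hnot : i ∉ ((PySem.List.enumerate t (i + 1)).foldl (pvStepB o cl) (s.dropLast, d)).2 := by
            intro hmem
            rcases pv_foldB_bound o cl t (i + 1) _ _ i hmem with h | h
            · have := hd i h; omega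
            · omega
          rw [if_pos (by simp [PySem.Set.contains]; exact hnot)]
          rw [List.map_cons, ih (i + 1) s.dropLast d (fun j hj => by have := hd j hj; omega)]
          have hb : ((s.dropLast.length : Int)) = (s.length : Int) - 1 := by
            have : 0 < s.length := List.length_pos_iff.2 hse
            simp [List.length_dropLast]; omega
          rw [hb, pv_foldA_acc o cl t ([] ++ [c])]
          simp
      · -- neither symbol: char kept, state unchanged
        rw [if_neg hc, if_neg hc, if_neg ho, if_neg ho]
        have hnot : i ∉ ((PySem.List.enumerate t (i + 1)).foldl (pvStepB o cl) (s, d)).2 := by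
          intro hmem
          rcases pv_foldB_bound o cl t (i + 1) _ _ i hmem with h | h
          · have := hd i h; omega
          · omega
        rw [if_pos (by simp [PySem.Set.contains]; exact hnot)]
        rw [List.map_cons, ih (i + 1) s d (fun j hj => by have := hd j hj; omega)]
        rw [pv_foldA_acc o cl t ([] ++ [c])]
        simp

-- ===== VERDICT (by name: the statement is the Claim_ definition above) =====
theorem delete_invalid_closing_spec : Claim_equal_delete_invalid_closing := by
  intro s o cl _
  unfold Spec_delete_invalid_closing delete_invalid_closing delete_invalid_closing_alt
  have h := pv_key o cl s.toList 0 ([] : List Int) PySem.Set.empty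
    (by intro j hj; simp [PySem.Set.empty] at hj)
  simp only [List.length_nil, Int.natCast_zero] at h
  simp only [h]
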